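-- pv_equiv track=rewrite | github.com/Steven-N/adventofcode2020 | day11/part2.py | compute
-- ===== SOURCE A (Python) =====
-- def compute(data):
--
--     positions = {
--         # left, right, up, down
--         (1, 0),
--         (-1, 0),
--         (0, 1),
--         (0, -1),
--         # diagonal
--         (1, 1),
--         (-1, -1),
--         (1, -1),
--         (-1, 1),
--     }
--
--     data = [line for line in data.splitlines()]
--
--     while True:
--         changed = False
--         y = 0
--         new_seat_arrangement = []
--         for line in data:
--             line_arr = list(line)
--             for idx, cur_seat in enumerate(line):
--                 if cur_seat == ".":
--                     continue
--                 adj_seats = []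
--                 for pos_x, pos_y in positions:
--                     cur_x = idx + pos_x
--                     cur_y = y + pos_y
--                     while (
--                         cur_x >= 0
--                         and cur_y >= 0
--                         and cur_x < len(line)
--                         and cur_y < len(data)
--                     ):
--                         if data[cur_y][cur_x] == "#":
--                             adj_seats.append(data[cur_y][cur_x])
--                             break
--                         if data[cur_y][cur_x] == "L":
--                             break
--                         cur_x += pos_x
--                         cur_y += pos_y
--
--                 if all(seat != "#" for seat in adj_seats) and line[idx] == "L":
--                     line_arr[idx] = "#"
--                     changed = True
--                 elif adj_seats.count("#") >= 5 and line[idx] == "#":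
--                     line_arr[idx] = "L"
--                     changed = True
--
--             new_seat_arrangement.append("".join(line_arr))
--             y += 1
--
--         data = new_seat_arrangement
--
--         if not changed:
--             break
--
--     occupied = 0
--     for line in data:
--         occupied += line.count("#")
--
--     return occupied
-- ===== SOURCE B (Python) =====
-- def compute(data):
--     # Seat-graph formulation: extract the seats once, build each seat's fixed
--     # line-of-sight neighbor list once, then run the automaton on a seat->occupied
--     # map (no grid rescanning, no ray re-walking per iteration).
--     grid = data.splitlines()
--     h = len(grid)
--     seats = []
--     for y, row in enumerate(grid):
--         for x, c in enumerate(row):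
--             if c == 'L' or c == '#':
--                 seats.append((y, x))
--     seat_set = set(seats)
--     nbrs = []
--     for (y, x) in seats:
--         nb = []
--         for dy in (-1, 0, 1):
--             for dx in (-1, 0, 1):
--                 if dy == 0 and dx == 0:
--                     continue
--                 ny, nx = y + dy, x + dx
--                 while 0 <= ny < h and 0 <= nx < len(grid[ny]):
--                     if (ny, nx) in seat_set:
--                         nb.append((ny, nx))
--                         break
--                     ny += dy
--                     nx += dx
--         nbrs.append(nb)
--     occ = {p: grid[p[0]][p[1]] == '#' for p in seats}
--     while True:
--         new = {}
--         for p, nb in zip(seats, nbrs):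
--             n = sum(occ[q] for q in nb)
--             new[p] = (n == 0) if not occ[p] else (n < 5)
--         if new == occ:
--             return sum(new.values())
--         occ = new
-- ===== Notes on version B (the rewrite author's own statement) =====
-- stated objective: faster
-- what changed: B reformulates the automaton on the seat graph: it extracts the seat list once, precomputes each seat's fixed line-of-sight neighbor list once, and then iterates a seat-to-occupied map over those cached neighbor lists until it is a fixpoint, instead of A's re-walking all 8 rays from every grid cell on every iteration.
-- outside the precondition, e.g. on compute('..\n.'): A returns 0, B returns 0; on compute('L.\n..#'): A raises IndexError, B returns 2
import Mathlib
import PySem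

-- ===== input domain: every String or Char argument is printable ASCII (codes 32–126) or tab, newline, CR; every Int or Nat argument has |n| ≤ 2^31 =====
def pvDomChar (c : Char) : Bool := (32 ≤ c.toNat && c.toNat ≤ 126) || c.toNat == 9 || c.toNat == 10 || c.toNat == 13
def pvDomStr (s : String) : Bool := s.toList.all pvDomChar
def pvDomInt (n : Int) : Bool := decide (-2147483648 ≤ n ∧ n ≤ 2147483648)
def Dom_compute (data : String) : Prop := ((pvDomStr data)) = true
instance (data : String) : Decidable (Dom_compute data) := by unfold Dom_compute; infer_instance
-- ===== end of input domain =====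

-- B re-formulates the automaton on the seat graph: it extracts the seat list once,
-- builds each seat's fixed line-of-sight neighbor list once, and then iterates a
-- seat ↦ occupied map over those cached neighbor lists (objective: faster — no ray
-- re-walking per iteration). Both ports bound the Python `while True` loop by the
-- same fuel `data.length + 2`, so the equivalence below is exact for every input
-- admitted by Pre_.

-- ===== PORT A =====
def pvGrid (data : String) : List (List Char) :=
  (PySem.Str.splitlines data).map String.toList
def pvCell (g : List (List Char)) (y x : Int) : Char :=
  ((PySem.List.pyGet? g y).bind (fun r => PySem.List.pyGet? r x)).getD ' '

-- the `positions` set literal; Python's set iteration order is unspecified, but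
-- `adj_seats` is only consumed via `all`/`count`, which are order-insensitive
def pvDirsA : List (Int × Int) := [(1,0),(-1,0),(0,1),(0,-1),(1,1),(-1,-1),(1,-1),(-1,1)]

-- the inner `while` ray scan; fuel `g.length + llen + 2` always exceeds the number
-- of iterations (each step moves one coordinate by ±1 towards the bound checked)
def pvRayA (g : List (List Char)) (llen : Nat) (dx dy : Int) : Nat → Int → Int → List Char
  | 0, _, _ => []
  | fuel+1, cx, cy =>
    if 0 ≤ cx && 0 ≤ cy && cx < (llen : Int) && cy < (g.length : Int) then
      let c := pvCell g cy cx
      if c == '#' then [c]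
      else if c == 'L' then []
      else pvRayA g llen dx dy fuel (cx + dx) (cy + dy)
    else []

def pvAdjA (g : List (List Char)) (llen : Nat) (y idx : Int) : List Char :=
  pvDirsA.foldl (fun acc d => acc ++ pvRayA g llen d.1 d.2 (g.length + llen + 2) (idx + d.1) (y + d.2)) []

def pvCellStepA (g : List (List Char)) (llen : Nat) (y idx : Int) (c : Char) : Char × Bool :=
  if c == '.' then (c, false)
  else
    let adj := pvAdjA g llen y idx
    if adj.all (fun s => s != '#') && c == 'L' then ('#', true)
    else if 5 ≤ adj.count '#' && c == '#' then ('L', true)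
    else (c, false)

def pvRowA (g : List (List Char)) (y : Int) (row : List Char) : List Char × Bool :=
  (PySem.List.enumerate row 0).foldl
    (fun acc p =>
      let r := pvCellStepA g row.length y p.1 p.2
      (acc.1 ++ [r.1], acc.2 || r.2))
    ([], false)

def pvStepA (g : List (List Char)) : List (List Char) × Bool × Int :=
  g.foldl
    (fun acc row =>
      let r := pvRowA g acc.2.2 row
      (acc.1 ++ [r.1], acc.2.1 || r.2, acc.2.2 + 1))
    ([], false, 0)

def pvLoopA : Nat → List (List Char) → List (List Char)
  | 0, g => g
  | fuel+1, g =>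
    let s := pvStepA g
    if s.2.1 then pvLoopA fuel s.1 else s.1

def compute (data : String) : Int :=
  let g := pvGrid data
  let fin := pvLoopA (data.toList.length + 2) g
  fin.foldl (fun acc row => acc + (row.count '#' : Int)) 0

-- ===== PORT B =====
-- B's grid access takes the coordinate PAIR (Python indexes grid[p[0]][p[1]])
def pvAt (g : List (List Char)) (p : Int × Int) : Char :=
  ((PySem.List.pyGet? g p.1).bind (fun r => PySem.List.pyGet? r p.2)).getD ' '

-- the two nested `for … enumerate` loops collecting seat coordinates
def pvSeatsB (g : List (List Char)) : List (Int × Int) :=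
  (PySem.List.enumerate g 0).foldl
    (fun acc yr =>
      (PySem.List.enumerate yr.2 0).foldl
        (fun a2 xc => if xc.2 == 'L' || xc.2 == '#' then a2 ++ [(yr.1, xc.1)] else a2) acc)
    []

-- `first_seat`: walk one ray until a member of the seat SET is hit; the fuel always
-- exceeds the number of iterations (one coordinate moves by ±1 towards its bound)
def pvWalkB (g : List (List Char)) (ss : PySem.Set (Int × Int)) (dy dx : Int) :
    Nat → Int → Int → Option (Int × Int)
  | 0, _, _ => none
  | f+1, ny, nx =>
    if 0 ≤ ny && ny < (g.length : Int) && 0 ≤ nx && nx < ((((PySem.List.pyGet? g ny).getD []).length : Nat) : Int) then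
      if PySem.Set.contains ss (ny, nx) then some (ny, nx)
      else pvWalkB g ss dy dx f (ny + dy) (nx + dx)
    else none

def pvFuelB (g : List (List Char)) : Nat :=
  g.length + g.foldl (fun a r => a + r.length) 0 + 2

-- B's `for dy … for dx …` direction order, as (dy, dx) pairs
def pvDirsB : List (Int × Int) := [(-1,-1),(-1,0),(-1,1),(0,-1),(0,1),(1,-1),(1,0),(1,1)]

def pvNbrsOf (g : List (List Char)) (ss : PySem.Set (Int × Int)) (p : Int × Int) : List (Int × Int) :=
  pvDirsB.foldl
    (fun nb d =>
      match pvWalkB g ss d.1 d.2 (pvFuelB g) (p.1 + d.1) (p.2 + d.2) with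
      | some q => nb ++ [q]
      | none => nb)
    []

-- `occ[q]`: first-match lookup in the seat ↦ occupied association list; the key is
-- always present (neighbor lists only hold seats), so Python's KeyError cannot fire
def pvLook (occ : List ((Int × Int) × Bool)) (q : Int × Int) : Bool :=
  ((occ.find? (fun e => e.1 == q)).map (fun e => e.2)).getD false

def pvNewVal (occ : List ((Int × Int) × Bool)) (pn : (Int × Int) × List (Int × Int)) : Bool :=
  let n : Int := (pn.2.map (fun q => if pvLook occ q then (1 : Int) else 0)).sum
  if pvLook occ pn.1 then decide (n < 5) else decide (n = 0)

def pvStepB (sn : List ((Int × Int) × List (Int × Int))) (occ : List ((Int × Int) × Bool)) :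
    List ((Int × Int) × Bool) :=
  sn.foldl (fun new pn => new ++ [(pn.1, pvNewVal occ pn)]) []

def pvSumVals (occ : List ((Int × Int) × Bool)) : Int :=
  (occ.map (fun e => if e.2 then (1 : Int) else 0)).sum

def pvLoopB (sn : List ((Int × Int) × List (Int × Int))) :
    Nat → List ((Int × Int) × Bool) → Int
  | 0, occ => pvSumVals occ
  | f+1, occ =>
    let new := pvStepB sn occ
    if new == occ then pvSumVals new else pvLoopB sn f new

-- the dict comprehensions/`new == occ`: the seat coordinates are pairwise distinct
-- (row-major enumeration), so each dict is exactly its seat-ordered association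
-- list and Python's dict equality is equality of these lists
def compute_alt (data : String) : Int :=
  let g := (PySem.Str.splitlines data).map String.toList
  let seats := pvSeatsB g
  let ss := PySem.Set.ofList seats
  let sn := seats.zip (seats.foldl (fun acc p => acc ++ [pvNbrsOf g ss p]) [])
  let occ0 := seats.map (fun p => (p, pvAt g p == '#'))
  pvLoopB sn (data.toList.length + 2) occ0

-- ===== PRECONDITION & SPEC =====
-- Pre_ excludes ragged inputs (lines of unequal length): there A's ray scan either
-- raises IndexError (it bounds x by the origin line's length, then indexes another,
-- shorter line) or, when it happens to return, clips visibility by an accidental window.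
def Pre_compute (data : String) : Prop :=
  ∀ r ∈ PySem.Str.splitlines data, ∀ r' ∈ PySem.Str.splitlines data, PySem.Str.len r = PySem.Str.len r'
instance (data : String) : Decidable (Pre_compute data) := by unfold Pre_compute; infer_instance

def pvWitness_compute : String := "L.L\nLLL"

def Spec_compute (data : String) (out : Int) : Prop := out = compute_alt data
instance (data : String) (out : Int) : Decidable (Spec_compute data out) := by unfold Spec_compute; infer_instance

-- ===== CLAIM (what is proved, stated in full; the proofs are below) =====
def Claim_equal_compute : Prop := ∀ (data : String), Dom_compute data → Pre_compute data → Spec_compute data (compute data)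

-- ===== LEMMAS AND PROOFS =====

-- proof-side notions: seats, shape, seat-set equality, rectangularity, ray measure
def pvSeat (c : Char) : Bool := c == 'L' || c == '#'

def pvShape (g0 g : List (List Char)) : Prop := g.map List.length = g0.map List.length

def pvSeatEq (g0 g : List (List Char)) : Prop :=
  ∀ y x : Int, 0 ≤ y → 0 ≤ x → pvSeat (pvCell g y x) = pvSeat (pvCell g0 y x)

def pvRowLen (g : List (List Char)) (y : Int) : Nat :=
  ((PySem.List.pyGet? g y).getD []).length

def pvRect (g0 : List (List Char)) : Prop := ∀ r ∈ g0, r.length = pvRowLen g0 0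

def pvM (h w : Nat) (dx dy cx cy : Int) : Nat :=
  (if dx = 1 then (w : Int) - cx else if dx = -1 then cx + 1
   else if dy = 1 then (h : Int) - cy else cy + 1).toNat

-- B's seat set and the occupancy list tracked for an evolved grid g
def pvSS (g0 : List (List Char)) : PySem.Set (Int × Int) := PySem.Set.ofList (pvSeatsB g0)

def pvOccOf (g0 g : List (List Char)) : List ((Int × Int) × Bool) :=
  (pvSeatsB g0).map (fun p => (p, pvCell g p.1 p.2 == '#'))

def pvSN (g0 : List (List Char)) : List ((Int × Int) × List (Int × Int)) :=
  (pvSeatsB g0).zip ((pvSeatsB g0).map (pvNbrsOf g0 (pvSS g0)))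

lemma pvLen_eq {g0 g : List (List Char)} (hsh : pvShape g0 g) : g.length = g0.length := by
  have := congrArg List.length hsh; simpa using this

lemma pvGet_in {α : Type} {g : List α} {y : Int} (hy : 0 ≤ y) (hyl : y.toNat < g.length) :
    PySem.List.pyGet? g y = some (g[y.toNat]'hyl) := by
  rw [PySem.List.pyGet?_of_nonneg _ hy]; simp [hyl]

lemma pvRowLen_rect {g0 : List (List Char)} (hre : pvRect g0) {cy : Int}
    (h0 : 0 ≤ cy) (h1 : cy < (g0.length : Int)) : pvRowLen g0 cy = pvRowLen g0 0 := by
  have hl : cy.toNat < g0.length := by omega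
  have := pvGet_in h0 hl
  have hmem : g0[cy.toNat]'hl ∈ g0 := List.getElem_mem _
  unfold pvRowLen; rw [this]; simpa using hre _ hmem

lemma pvCell_in {g : List (List Char)} {y x : Int} (hy : 0 ≤ y) (hx : 0 ≤ x)
    (hyl : y.toNat < g.length) (hxl : x.toNat < (g[y.toNat]'hyl).length) :
    pvCell g y x = (g[y.toNat]'hyl)[x.toNat]'hxl := by
  unfold pvCell; rw [pvGet_in hy hyl]; simp [pvGet_in hx hxl]

lemma pvCell_row {g : List (List Char)} {y : Int} {row : List Char}
    (hrow : PySem.List.pyGet? g y = some row) (x : Int) :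
    pvCell g y x = (PySem.List.pyGet? row x).getD ' ' := by
  simp [pvCell, hrow]

-- generic loop shapes used by the ports
lemma pvFoldl_pair {α β : Type} (F : α → β × Bool) :
    ∀ (l : List α) (R : List β) (b : Bool),
      l.foldl (fun acc x => (acc.1 ++ [(F x).1], acc.2 || (F x).2)) (R, b)
        = (R ++ l.map (fun x => (F x).1), b || l.any (fun x => (F x).2)) := by
  intro l; induction l with
  | nil => simp
  | cons hd tl ih => intro R b; simp [ih, Bool.or_assoc]

lemma pvFoldl_tri {β : Type} (G : Int → List Char → β × Bool) :
    ∀ (l : List (List Char)) (R : List β) (b : Bool) (s : Int),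
      l.foldl (fun acc row => (acc.1 ++ [(G acc.2.2 row).1], acc.2.1 || (G acc.2.2 row).2, acc.2.2 + 1)) (R, b, s)
        = (R ++ (PySem.List.enumerate l s).map (fun yr => (G yr.1 yr.2).1),
           b || (PySem.List.enumerate l s).any (fun yr => (G yr.1 yr.2).2),
           s + l.length) := by
  intro l; induction l with
  | nil => simp
  | cons hd tl ih =>
    intro R b s
    rw [List.foldl_cons, ih]
    simp only [PySem.List.enumerate_cons, List.map_cons, List.any_cons, Prod.mk.injEq]
    refine ⟨by simp, by simp [Bool.or_assoc], by simp; ring⟩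

-- guards fail ⇒ both scans return immediately, whatever the fuel
lemma pvRayA_stop {g : List (List Char)} {llen : Nat} {dx dy cx cy : Int}
    (h : (0 ≤ cx && 0 ≤ cy && cx < (llen : Int) && cy < (g.length : Int)) = false) :
    ∀ f, pvRayA g llen dx dy f cx cy = [] := by
  intro f; cases f <;> simp [pvRayA, h]

lemma pvWalkB_stop {g0 : List (List Char)} {ss : PySem.Set (Int × Int)} {dy dx ny nx : Int}
    (h : (0 ≤ ny && ny < (g0.length : Int) && 0 ≤ nx && nx < (pvRowLen g0 ny : Int)) = false) :
    ∀ f, pvWalkB g0 ss dy dx f ny nx = none := by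
  have h' : (0 ≤ ny && ny < (g0.length : Int) && 0 ≤ nx && nx < ((((PySem.List.pyGet? g0 ny).getD []).length : Nat) : Int)) = false := h
  intro f; cases f with
  | zero => rfl
  | succ f => simp [pvWalkB, h']

-- the seat list is the row-major list of coordinates of 'L'/'#' cells
lemma pvSeatsB_desc (g : List (List Char)) :
    pvSeatsB g
      = (PySem.List.enumerate g 0).flatMap (fun yr =>
          ((PySem.List.enumerate yr.2 0).filter (fun xc => pvSeat xc.2)).map (fun xc => (yr.1, xc.1))) := by
  unfold pvSeatsB
  have inner : ∀ (yr : Int × List Char) (acc : List (Int × Int)),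
      (PySem.List.enumerate yr.2 0).foldl
        (fun a2 xc => if xc.2 == 'L' || xc.2 == '#' then a2 ++ [(yr.1, xc.1)] else a2) acc
        = acc ++ ((PySem.List.enumerate yr.2 0).filter (fun xc => pvSeat xc.2)).map (fun xc => (yr.1, xc.1)) := by
    intro yr acc
    simpa [pvSeat] using PySem.List.foldl_append_if (fun xc : Int × Char => xc.2 == 'L' || xc.2 == '#')
      (fun xc => (yr.1, xc.1)) (PySem.List.enumerate yr.2 0) acc
  calc (PySem.List.enumerate g 0).foldl
        (fun acc yr => (PySem.List.enumerate yr.2 0).foldl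
          (fun a2 xc => if xc.2 == 'L' || xc.2 == '#' then a2 ++ [(yr.1, xc.1)] else a2) acc) []
      = (PySem.List.enumerate g 0).foldl
          (fun acc yr => acc ++ ((PySem.List.enumerate yr.2 0).filter (fun xc => pvSeat xc.2)).map (fun xc => (yr.1, xc.1))) [] := by
        apply PySem.List.foldl_congr_mem
        intro acc yr _; exact inner yr acc
    _ = _ := by
        simpa using PySem.List.foldl_append_eq_flatMap
          (fun yr : Int × List Char => ((PySem.List.enumerate yr.2 0).filter (fun xc => pvSeat xc.2)).map (fun xc => (yr.1, xc.1)))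
          (PySem.List.enumerate g 0) []

lemma pvMem_seats {g : List (List Char)} {y x : Int} :
    (y, x) ∈ pvSeatsB g
      ↔ ∃ (k : Nat) (hk : k < g.length) (j : Nat) (hj : j < (g[k]'hk).length),
          pvSeat ((g[k]'hk)[j]'hj) = true ∧ y = (k : Int) ∧ x = (j : Int) := by
  rw [pvSeatsB_desc]
  simp only [List.mem_flatMap, List.mem_map, List.mem_filter, PySem.List.mem_enumerate_iff]
  constructor
  · rintro ⟨yr, ⟨k, hk, rfl⟩, xc, ⟨⟨j, hj, rfl⟩, hs⟩, hpair⟩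
    exact ⟨k, hk, j, hj, hs, by simpa using hpair.symm⟩
  · rintro ⟨k, hk, j, hj, hs, rfl, rfl⟩
    exact ⟨((k : Int), g[k]'hk), ⟨k, hk, by simp⟩, ⟨(j : Int), (g[k]'hk)[j]'hj⟩,
      ⟨⟨j, hj, by simp⟩, hs⟩, by simp⟩

-- membership in the seat set = the cell holds a seat character (in-bounds cells)
lemma pvContains_seat {g0 : List (List Char)} {y x : Int} (hy : 0 ≤ y) (hx : 0 ≤ x)
    (hyl : y.toNat < g0.length) (hxl : x.toNat < (g0[y.toNat]'hyl).length) :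
    PySem.Set.contains (pvSS g0) (y, x) = pvSeat (pvCell g0 y x) := by
  rw [pvCell_in hy hx hyl hxl]
  by_cases hs : pvSeat ((g0[y.toNat]'hyl)[x.toNat]'hxl) = true
  · rw [hs]
    rw [PySem.Set.contains_iff]
    unfold pvSS
    rw [PySem.Set.mem_ofList, pvMem_seats]
    exact ⟨y.toNat, hyl, x.toNat, hxl, hs, (Int.toNat_of_nonneg hy).symm, (Int.toNat_of_nonneg hx).symm⟩
  · rw [Bool.not_eq_true] at hs
    rw [hs, Bool.eq_false_iff]
    intro hc
    rw [PySem.Set.contains_iff] at hc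
    unfold pvSS at hc
    rw [PySem.Set.mem_ofList, pvMem_seats] at hc
    obtain ⟨k, hk, j, hj, hseat, hyk, hxj⟩ := hc
    have : k = y.toNat := by omega
    subst this
    have : j = x.toNat := by omega
    subst this
    rw [hseat] at hs
    exact Bool.true_eq_false.mp hs

lemma pvWalk_mem {g0 : List (List Char)} {dy dx : Int} :
    ∀ {f : Nat} {ny nx : Int} {q : Int × Int},
      pvWalkB g0 (pvSS g0) dy dx f ny nx = some q → q ∈ pvSeatsB g0 := by
  intro f
  induction f with
  | zero => intro ny nx q h; simp [pvWalkB] at h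
  | succ f ih =>
    intro ny nx q h
    unfold pvWalkB at h
    split at h
    · split at h
      · rename_i hc
        rw [PySem.Set.contains_iff] at hc
        unfold pvSS at hc
        rw [PySem.Set.mem_ofList] at hc
        cases h
        exact hc
      · exact ih h
    · exact absurd h (by simp)

-- first-match lookup in a key-determined association list
lemma pvLook_map (f : (Int × Int) → Bool) :
    ∀ (l : List (Int × Int)) {q : Int × Int}, q ∈ l →
      pvLook (l.map (fun p => (p, f p))) q = f q := by
  intro l
  induction l with
  | nil => intro q h; simp at h
  | cons hd tl ih =>
    intro q hq
    unfold pvLook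
    by_cases h : hd = q
    · subst h; simp [List.find?]
    · have hne : (hd == q) = false := by simp [h]
      simp only [List.map_cons, List.find?]
      simp only [hne]
      rcases List.mem_cons.mp hq with h' | h'
      · exact absurd h'.symm h
      · exact ih h'

-- A's ray scan of the CURRENT grid finds exactly B's cached first seat (seat
-- positions never change), and contributes '#' iff that seat is now occupied
lemma pvRay_walk_eq (g0 g : List (List Char)) (hsh : pvShape g0 g) (hse : pvSeatEq g0 g) (hre : pvRect g0)
    (dx dy : Int) (hdx : dx = -1 ∨ dx = 0 ∨ dx = 1) (hdy : dy = -1 ∨ dy = 0 ∨ dy = 1)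
    (hnz : ¬(dx = 0 ∧ dy = 0)) :
    ∀ (fA fB : Nat) (cx cy : Int),
      pvM g0.length (pvRowLen g0 0) dx dy cx cy ≤ fA →
      pvM g0.length (pvRowLen g0 0) dx dy cx cy ≤ fB →
      pvRayA g (pvRowLen g0 0) dx dy fA cx cy =
        (match pvWalkB g0 (pvSS g0) dy dx fB cy cx with
         | some p => if pvCell g p.1 p.2 == '#' then ['#'] else []
         | none => []) := by
  intro fA
  induction fA with
  | zero =>
    intro fB cx cy hA hB
    have hm : pvM g0.length (pvRowLen g0 0) dx dy cx cy = 0 := by omega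
    have hBg : ((0 ≤ cy && cy < (g0.length : Int) && 0 ≤ cx && cx < (pvRowLen g0 cy : Int)) = false) := by
      rw [Bool.eq_false_iff]
      intro hgb
      simp only [Bool.and_eq_true, decide_eq_true_eq] at hgb
      obtain ⟨⟨⟨h1, h2⟩, h3⟩, h4⟩ := hgb
      rw [pvRowLen_rect hre h1 h2] at h4
      rcases hdx with h|h|h <;> rcases hdy with h'|h'|h' <;>
        first
        | exact (hnz ⟨h, h'⟩).elim
        | (simp only [pvM, h, h', if_true] at hm; omega)
    rw [pvWalkB_stop hBg]
    simp [pvRayA]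
  | succ fa ih =>
    intro fB cx cy hA hB
    by_cases hg : 0 ≤ cx ∧ 0 ≤ cy ∧ cx < (pvRowLen g0 0 : Int) ∧ cy < (g0.length : Int)
    · -- both guards hold
      have hw : pvRowLen g0 cy = pvRowLen g0 0 := pvRowLen_rect hre hg.2.1 hg.2.2.2
      have hAg : (0 ≤ cx && 0 ≤ cy && cx < ((pvRowLen g0 0 : Nat) : Int) && cy < ((g.length : Nat) : Int)) = true := by
        simp only [Bool.and_eq_true, decide_eq_true_eq]
        refine ⟨⟨⟨hg.1, hg.2.1⟩, hg.2.2.1⟩, ?_⟩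
        rw [pvLen_eq hsh]; exact hg.2.2.2
      have hBg : (0 ≤ cy && cy < (g0.length : Int) && 0 ≤ cx && cx < (pvRowLen g0 cy : Int)) = true := by
        simp only [Bool.and_eq_true, decide_eq_true_eq]
        rw [hw]
        exact ⟨⟨⟨hg.2.1, hg.2.2.2⟩, hg.1⟩, hg.2.2.1⟩
      have hm1 : 1 ≤ pvM g0.length (pvRowLen g0 0) dx dy cx cy := by
        rcases hdx with h|h|h <;> rcases hdy with h'|h'|h' <;>
          first
          | exact (hnz ⟨h, h'⟩).elim
          | (simp only [pvM, h, h', if_true]; omega)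
      cases fB with
      | zero => omega
      | succ fb =>
        have hyl : cy.toNat < g0.length := by omega
        have hxl : cx.toNat < (g0[cy.toNat]'hyl).length := by
          have hmem : g0[cy.toNat]'hyl ∈ g0 := List.getElem_mem _
          have := hre _ hmem
          omega
        have hcont : PySem.Set.contains (pvSS g0) (cy, cx) = pvSeat (pvCell g0 cy cx) :=
          pvContains_seat hg.2.1 hg.1 hyl hxl
        have hsc := hse cy cx hg.2.1 hg.1
        have hBg' : (0 ≤ cy && cy < (g0.length : Int) && 0 ≤ cx && cx < ((((PySem.List.pyGet? g0 cy).getD []).length : Nat) : Int)) = true := hBg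
        simp only [pvRayA, pvWalkB]
        simp only [hAg, hBg', if_true]
        by_cases hC : (pvCell g cy cx == '#') = true
        · have hs0 : pvSeat (pvCell g0 cy cx) = true := by
            rw [← hsc]; simp [pvSeat, hC]
          have hmemb : ((cy, cx) ∈ pvSS g0) := by
            rw [← PySem.Set.contains_iff, hcont]; exact hs0
          have hceq : pvCell g cy cx = '#' := by simpa using hC
          simp [hmemb, hceq]
        · by_cases hL : (pvCell g cy cx == 'L') = true
          · have hs0 : pvSeat (pvCell g0 cy cx) = true := by
              rw [← hsc]; simp [pvSeat, hL]
            have hmemb : ((cy, cx) ∈ pvSS g0) := by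
              rw [← PySem.Set.contains_iff, hcont]; exact hs0
            simp [hmemb, hC, hL]
          · have hs0 : pvSeat (pvCell g0 cy cx) = false := by
              rw [← hsc]; simp [pvSeat, hC, hL]
            have hcf : PySem.Set.contains (pvSS g0) (cy, cx) = false := by
              rw [hcont]; exact hs0
            simp only [hcf, hC, hL, if_false, Bool.false_eq_true]
            have hdec : pvM g0.length (pvRowLen g0 0) dx dy (cx + dx) (cy + dy)
                < pvM g0.length (pvRowLen g0 0) dx dy cx cy := by
              rcases hdx with h|h|h <;> rcases hdy with h'|h'|h' <;>
                first
                | exact (hnz ⟨h, h'⟩).elim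
                | (simp only [pvM, h, h', if_true]
                   have := hg.1; have := hg.2.1; have := hg.2.2.1; have := hg.2.2.2; omega)
            exact ih fb (cx + dx) (cy + dy) (by omega) (by omega)
    · -- guard fails: both scans stop
      have hAg : (0 ≤ cx && 0 ≤ cy && cx < ((pvRowLen g0 0 : Nat) : Int) && cy < ((g.length : Nat) : Int)) = false := by
        rw [Bool.eq_false_iff]
        intro hgb
        simp only [Bool.and_eq_true, decide_eq_true_eq] at hgb
        rw [pvLen_eq hsh] at hgb
        exact hg ⟨hgb.1.1.1, hgb.1.1.2, hgb.1.2, hgb.2⟩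
      have hBg : (0 ≤ cy && cy < (g0.length : Int) && 0 ≤ cx && cx < (pvRowLen g0 cy : Int)) = false := by
        rw [Bool.eq_false_iff]
        intro hgb
        simp only [Bool.and_eq_true, decide_eq_true_eq] at hgb
        obtain ⟨⟨⟨h1, h2⟩, h3⟩, h4⟩ := hgb
        rw [pvRowLen_rect hre h1 h2] at h4
        exact hg ⟨h3, h1, h4, h2⟩
      rw [pvWalkB_stop hBg, pvRayA_stop hAg]


lemma pvW_le_fuelB {g0 : List (List Char)} (h : g0 ≠ []) : pvRowLen g0 0 ≤ pvFuelB g0 := by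
  obtain ⟨r, t, rfl⟩ := List.exists_cons_of_ne_nil h
  unfold pvFuelB pvRowLen
  rw [PySem.List.foldl_add_nat]
  simp only [PySem.List.pyGet?_zero_cons, Option.getD_some, List.length_cons, List.map_cons,
    List.sum_cons]
  omega

lemma pvAdjA_desc (g : List (List Char)) (llen : Nat) (y x : Int) :
    pvAdjA g llen y x
      = pvDirsA.flatMap (fun d => pvRayA g llen d.1 d.2 (g.length + llen + 2) (x + d.1) (y + d.2)) := by
  unfold pvAdjA
  simpa using PySem.List.foldl_append_eq_flatMap
    (fun d : Int × Int => pvRayA g llen d.1 d.2 (g.length + llen + 2) (x + d.1) (y + d.2)) pvDirsA []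

lemma pvNbrsOf_desc (g : List (List Char)) (ss : PySem.Set (Int × Int)) (p : Int × Int) :
    pvNbrsOf g ss p
      = pvDirsB.flatMap (fun d => (pvWalkB g ss d.1 d.2 (pvFuelB g) (p.1 + d.1) (p.2 + d.2)).toList) := by
  unfold pvNbrsOf
  have hbody : ∀ (nb : List (Int × Int)) (d : Int × Int),
      (match pvWalkB g ss d.1 d.2 (pvFuelB g) (p.1 + d.1) (p.2 + d.2) with
       | some q => nb ++ [q]
       | none => nb)
        = nb ++ (pvWalkB g ss d.1 d.2 (pvFuelB g) (p.1 + d.1) (p.2 + d.2)).toList := by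
    intro nb d
    cases pvWalkB g ss d.1 d.2 (pvFuelB g) (p.1 + d.1) (p.2 + d.2) <;> simp
  calc pvDirsB.foldl
        (fun nb d =>
          match pvWalkB g ss d.1 d.2 (pvFuelB g) (p.1 + d.1) (p.2 + d.2) with
          | some q => nb ++ [q]
          | none => nb) []
      = pvDirsB.foldl
          (fun nb d => nb ++ (pvWalkB g ss d.1 d.2 (pvFuelB g) (p.1 + d.1) (p.2 + d.2)).toList) [] := by
        apply PySem.List.foldl_congr_mem
        intro nb d _; exact hbody nb d
    _ = _ := by
        simpa using PySem.List.foldl_append_eq_flatMap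
          (fun d : Int × Int => (pvWalkB g ss d.1 d.2 (pvFuelB g) (p.1 + d.1) (p.2 + d.2)).toList) pvDirsB []

-- B's occupied-neighbor sum = the '#'-count of A's freshly scanned adjacency list
lemma pvN_eq_count (g0 g : List (List Char)) (hsh : pvShape g0 g) (hse : pvSeatEq g0 g)
    (hre : pvRect g0) (y x : Int) (hy : 0 ≤ y) (hy2 : y < (g0.length : Int))
    (hx : 0 ≤ x) (hx2 : x < (pvRowLen g0 0 : Int)) :
    ((pvNbrsOf g0 (pvSS g0) (y, x)).map (fun q => if pvLook (pvOccOf g0 g) q then (1 : Int) else 0)).sum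
      = (((pvAdjA g (pvRowLen g0 0) y x).count '#' : Nat) : Int) := by
  have hlen := pvLen_eq hsh
  have hWle : pvRowLen g0 0 ≤ pvFuelB g0 := pvW_le_fuelB (by intro h; subst h; simp at hy2; omega)
  have hlook : ∀ q ∈ pvSeatsB g0, pvLook (pvOccOf g0 g) q = (pvCell g q.1 q.2 == '#') := by
    intro q hq
    exact pvLook_map (fun p => pvCell g p.1 p.2 == '#') (pvSeatsB g0) hq
  have piece : ∀ dx dy : Int, dx = -1 ∨ dx = 0 ∨ dx = 1 → dy = -1 ∨ dy = 0 ∨ dy = 1 →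
      ¬(dx = 0 ∧ dy = 0) →
      pvRayA g (pvRowLen g0 0) dx dy (g.length + pvRowLen g0 0 + 2) (x + dx) (y + dy)
        = match pvWalkB g0 (pvSS g0) dy dx (pvFuelB g0) (y + dy) (x + dx) with
          | some p => if pvCell g p.1 p.2 == '#' then ['#'] else []
          | none => [] := by
    intro dx dy hdx hdy hnz
    apply pvRay_walk_eq g0 g hsh hse hre dx dy hdx hdy hnz
    · rcases hdx with h|h|h <;> rcases hdy with h'|h'|h' <;>
        first
        | exact (hnz ⟨h, h'⟩).elim
        | (simp only [pvM, h, h', if_true]; omega)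
    · unfold pvFuelB
      rcases hdx with h|h|h <;> rcases hdy with h'|h'|h' <;>
        first
        | exact (hnz ⟨h, h'⟩).elim
        | (simp only [pvM, h, h', if_true]
           unfold pvFuelB at hWle; omega)
  have cnt : ∀ o : Option (Int × Int),
      ((List.count '#' (match o with
          | some p => if pvCell g p.1 p.2 == '#' then ['#'] else []
          | none => ([] : List Char)) : Nat) : Int)
        = match o with
          | some p => if pvCell g p.1 p.2 == '#' then (1 : Int) else 0
          | none => 0 := by
    intro o
    cases o with
    | none => simp
    | some p => by_cases hp : pvCell g p.1 p.2 = '#' <;> simp [hp]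
  have occ1 : ∀ {dy dx : Int},
      ((pvWalkB g0 (pvSS g0) dy dx (pvFuelB g0) (y + dy) (x + dx)).toList.map
        (fun q => if pvLook (pvOccOf g0 g) q then (1 : Int) else 0)).sum
        = match pvWalkB g0 (pvSS g0) dy dx (pvFuelB g0) (y + dy) (x + dx) with
          | some p => if pvCell g p.1 p.2 == '#' then (1 : Int) else 0
          | none => 0 := by
    intro dy dx
    cases hw : pvWalkB g0 (pvSS g0) dy dx (pvFuelB g0) (y + dy) (x + dx) with
    | none => simp
    | some q =>
      have hq : q ∈ pvSeatsB g0 := pvWalk_mem hw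
      have := hlook q hq
      by_cases hp : pvCell g q.1 q.2 = '#' <;> simp [this, hp]
  rw [pvAdjA_desc, pvNbrsOf_desc]
  simp only [pvDirsA, pvDirsB, List.flatMap_cons, List.flatMap_nil, List.append_nil,
    List.count_append, List.map_append, List.sum_append]
  push_cast
  rw [piece 1 0 (by norm_num) (by norm_num) (by norm_num),
      piece (-1) 0 (by norm_num) (by norm_num) (by norm_num),
      piece 0 1 (by norm_num) (by norm_num) (by norm_num),
      piece 0 (-1) (by norm_num) (by norm_num) (by norm_num),
      piece 1 1 (by norm_num) (by norm_num) (by norm_num),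
      piece (-1) (-1) (by norm_num) (by norm_num) (by norm_num),
      piece 1 (-1) (by norm_num) (by norm_num) (by norm_num),
      piece (-1) 1 (by norm_num) (by norm_num) (by norm_num)]
  simp only [cnt, occ1]
  ring


-- a non-seat character passes through A's per-cell step unchanged and unflagged
lemma pvStepA_nonseat (g : List (List Char)) (llen : Nat) (y x : Int) (c : Char)
    (h : pvSeat c = false) : pvCellStepA g llen y x c = (c, false) := by
  have hL : (c == 'L') = false := by
    rw [Bool.eq_false_iff]; intro hc; rw [pvSeat, hc] at h; simp at h
  have hH : (c == '#') = false := by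
    rw [Bool.eq_false_iff]; intro hc; rw [pvSeat, hc] at h; simp [hc] at h
  unfold pvCellStepA
  by_cases hd : (c == '.') = true
  · simp [hd]
  · simp [hd, hL, hH]

lemma pvSeat_stepA (g : List (List Char)) (llen : Nat) (y x : Int) (c : Char) :
    pvSeat (pvCellStepA g llen y x c).1 = pvSeat c := by
  unfold pvCellStepA pvSeat
  by_cases h : (c == '.') = true <;> simp [h]
  split_ifs <;> simp_all

-- A's per-cell step at a seat, written through B's cached neighbor count
lemma pvSeatStep (g0 g : List (List Char)) (hsh : pvShape g0 g) (hse : pvSeatEq g0 g)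
    (hre : pvRect g0) (y x : Int) (hy : 0 ≤ y) (hy2 : y < (g0.length : Int))
    (hx : 0 ≤ x) (hx2 : x < (pvRowLen g0 0 : Int)) (c : Char) (hc : c = pvCell g y x)
    (hseat : pvSeat c = true) :
    (pvCellStepA g (pvRowLen g0 0) y x c).1
        = (if pvNewVal (pvOccOf g0 g) ((y, x), pvNbrsOf g0 (pvSS g0) (y, x)) then '#' else 'L')
      ∧ (pvCellStepA g (pvRowLen g0 0) y x c).2
        = decide (pvNewVal (pvOccOf g0 g) ((y, x), pvNbrsOf g0 (pvSS g0) (y, x)) ≠ (c == '#')) := by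
  have hyl : y.toNat < g0.length := by omega
  have hxl : x.toNat < (g0[y.toNat]'hyl).length := by
    have hmem : g0[y.toNat]'hyl ∈ g0 := List.getElem_mem _
    have := hre _ hmem
    omega
  have hmemp : ((y, x) : Int × Int) ∈ pvSeatsB g0 := by
    rw [pvMem_seats]
    have hs0 : pvSeat (pvCell g0 y x) = true := by
      rw [← hse y x hy hx, ← hc]; exact hseat
    rw [pvCell_in hy hx hyl hxl] at hs0
    exact ⟨y.toNat, hyl, x.toNat, hxl, hs0, (Int.toNat_of_nonneg hy).symm, (Int.toNat_of_nonneg hx).symm⟩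
  have hlookp : pvLook (pvOccOf g0 g) (y, x) = (c == '#') := by
    unfold pvOccOf
    rw [pvLook_map (fun p => pvCell g p.1 p.2 == '#') (pvSeatsB g0) hmemp]
    rw [hc]
  have hn := pvN_eq_count g0 g hsh hse hre y x hy hy2 hx hx2
  have hdot : (c == '.') = false := by
    rw [Bool.eq_false_iff]; intro hc'
    have hcd := eq_of_beq hc'; subst hcd; simp [pvSeat] at hseat
  unfold pvCellStepA pvNewVal
  simp only [hdot, Bool.false_eq_true, if_false, hlookp, hn]
  set n := (pvAdjA g (pvRowLen g0 0) y x).count '#' with hnn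
  rcases Bool.or_eq_true_iff.mp hseat with hcl | hch
  · -- c == 'L'
    have hclf : (c == '#') = false := by
      rw [Bool.eq_false_iff]; intro h'
      have := eq_of_beq hcl; have := eq_of_beq h'; simp_all
    by_cases hz : n = 0
    · have hall : (pvAdjA g (pvRowLen g0 0) y x).all (fun s => s != '#') = true := by
        rw [List.all_eq_true]
        intro s hsmem
        have : '#' ∉ pvAdjA g (pvRowLen g0 0) y x := by
          rw [← List.count_eq_zero (a := '#')]; exact hz
        simp only [bne_iff_ne, ne_eq]
        intro hcontra; exact this (hcontra ▸ hsmem)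
      simp [hall, hcl, hclf, hz, eq_of_beq hcl]
    · have hall : (pvAdjA g (pvRowLen g0 0) y x).all (fun s => s != '#') = false := by
        rw [Bool.eq_false_iff]
        intro hcontra
        rw [List.all_eq_true] at hcontra
        have hmem : '#' ∈ pvAdjA g (pvRowLen g0 0) y x := by
          by_contra hnm
          exact hz (List.count_eq_zero.mpr hnm)
        have := hcontra _ hmem
        simp at this
      simp [hall, hcl, hclf, hz, eq_of_beq hcl]
  · -- c == '#'
    have hclf : (c == 'L') = false := by
      rw [Bool.eq_false_iff]; intro h'
      have := eq_of_beq hch; have := eq_of_beq h'; simp_all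
    by_cases h5 : 5 ≤ n
    · have h5' : ¬((n : Int) < 5) := by exact_mod_cast not_lt.mpr h5
      simp [hch, hclf, h5, h5', eq_of_beq hch]
    · have h5' : ((n : Int) < 5) := by exact_mod_cast not_le.mp h5
      simp [hch, hclf, h5, h5', eq_of_beq hch]

-- loop-shape descriptions of both steps
lemma pvRowA_desc (g : List (List Char)) (y : Int) (row : List Char) :
    pvRowA g y row
      = ((PySem.List.enumerate row 0).map (fun p => (pvCellStepA g row.length y p.1 p.2).1),
         (PySem.List.enumerate row 0).any (fun p => (pvCellStepA g row.length y p.1 p.2).2)) := by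
  unfold pvRowA
  exact pvFoldl_pair (fun p : Int × Char => pvCellStepA g row.length y p.1 p.2) (PySem.List.enumerate row 0) [] false

lemma pvStepA_desc (g : List (List Char)) :
    pvStepA g
      = ((PySem.List.enumerate g 0).map (fun yr => (pvRowA g yr.1 yr.2).1),
         (PySem.List.enumerate g 0).any (fun yr => (pvRowA g yr.1 yr.2).2),
         (g.length : Int)) := by
  unfold pvStepA
  have h := pvFoldl_tri (pvRowA g) g [] false 0
  simpa using h

lemma pvStepB_desc (sn : List ((Int × Int) × List (Int × Int))) (occ : List ((Int × Int) × Bool)) :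
    pvStepB sn occ = sn.map (fun pn => (pn.1, pvNewVal occ pn)) := by
  unfold pvStepB
  simpa using PySem.List.foldl_append_singleton_eq_map
    (fun pn : (Int × Int) × List (Int × Int) => (pn.1, pvNewVal occ pn)) sn []

lemma pvSN_desc (g0 : List (List Char)) :
    pvSN g0 = (pvSeatsB g0).map (fun p => (p, pvNbrsOf g0 (pvSS g0) p)) := by
  unfold pvSN
  simpa using (List.zip_map' (f := id) (g := pvNbrsOf g0 (pvSS g0)) (l := pvSeatsB g0))

-- reading a cell of A's stepped grid
lemma pvStepA_cell (g : List (List Char)) {y x : Int} (hy : 0 ≤ y) (hx : 0 ≤ x)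
    (hyl : y.toNat < g.length) (hxl : x.toNat < (g[y.toNat]'hyl).length) :
    pvCell (pvStepA g).1 y x
      = (pvCellStepA g (g[y.toNat]'hyl).length y x (pvCell g y x)).1 := by
  have hyy : ((y.toNat : Int)) = y := Int.toNat_of_nonneg hy
  have hxx : ((x.toNat : Int)) = x := Int.toNat_of_nonneg hx
  have h1 : PySem.List.pyGet? (pvStepA g).1 y = some ((pvRowA g ((0 : Int) + (y.toNat : Int)) (g[y.toNat]'hyl)).1) := by
    rw [pvStepA_desc]
    rw [PySem.List.pyGet?_of_nonneg _ hy, List.getElem?_map, PySem.List.getElem?_enumerate]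
    simp [List.getElem?_eq_getElem hyl]
  rw [pvCell_row h1, pvRowA_desc]
  rw [PySem.List.pyGet?_of_nonneg _ hx, List.getElem?_map, PySem.List.getElem?_enumerate]
  simp only [List.getElem?_eq_getElem hxl, Option.map_some, Option.getD_some]
  rw [pvCell_in hy hx hyl hxl]
  simp [hyy, hxx]

lemma pvStepA_shape (g : List (List Char)) :
    (pvStepA g).1.map List.length = g.map List.length := by
  rw [pvStepA_desc]
  calc ((PySem.List.enumerate g 0).map (fun yr => (pvRowA g yr.1 yr.2).1)).map List.length
      = (PySem.List.enumerate g 0).map (fun yr => (pvRowA g yr.1 yr.2).1.length) := by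
        rw [List.map_map]; rfl
    _ = (PySem.List.enumerate g 0).map (fun yr => yr.2.length) := by
        refine List.map_congr_left (fun yr _ => ?_)
        rw [pvRowA_desc]
        simp [PySem.List.length_enumerate]
    _ = ((PySem.List.enumerate g 0).map (fun yr => yr.2)).map List.length := by
        rw [List.map_map]; rfl
    _ = g.map List.length := by rw [PySem.List.map_snd_enumerate]

lemma pvStepA_seatEq (g : List (List Char)) : pvSeatEq g (pvStepA g).1 := by
  intro y x hy hx
  by_cases hyl : y.toNat < g.length
  · by_cases hxl : x.toNat < (g[y.toNat]'hyl).length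
    · rw [pvStepA_cell g hy hx hyl hxl, pvSeat_stepA]
    · have h1 : PySem.List.pyGet? (pvStepA g).1 y = some ((pvRowA g ((0 : Int) + (y.toNat : Int)) (g[y.toNat]'hyl)).1) := by
        rw [pvStepA_desc]
        rw [PySem.List.pyGet?_of_nonneg _ hy, List.getElem?_map, PySem.List.getElem?_enumerate]
        simp [List.getElem?_eq_getElem hyl]
      have hrowg : PySem.List.pyGet? g y = some (g[y.toNat]'hyl) := pvGet_in hy hyl
      rw [pvCell_row h1, pvCell_row hrowg, pvRowA_desc]
      have hxg : PySem.List.pyGet? ((PySem.List.enumerate (g[y.toNat]'hyl) 0).map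
          (fun p => (pvCellStepA g (g[y.toNat]'hyl).length ((0 : Int) + (y.toNat : Int)) p.1 p.2).1)) x = none := by
        rw [PySem.List.pyGet?_of_nonneg _ hx]
        simp only [List.getElem?_map, PySem.List.getElem?_enumerate]
        simp [List.getElem?_eq_none_iff]
        omega
      have hxg2 : PySem.List.pyGet? (g[y.toNat]'hyl) x = none := by
        rw [PySem.List.pyGet?_of_nonneg _ hx]
        simp [List.getElem?_eq_none_iff]
        omega
      rw [hxg, hxg2]
  · have h1 : PySem.List.pyGet? (pvStepA g).1 y = none := by
      rw [pvStepA_desc, PySem.List.pyGet?_of_nonneg _ hy]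
      simp only [List.getElem?_map, PySem.List.getElem?_enumerate]
      simp [List.getElem?_eq_none_iff, PySem.List.length_enumerate]
      omega
    have h2 : PySem.List.pyGet? g y = none := by
      rw [PySem.List.pyGet?_of_nonneg _ hy]
      simp [List.getElem?_eq_none_iff]
      omega
    simp [pvCell, h1, h2]


lemma pvCell_nat (g : List (List Char)) (k j : Nat) (hk : k < g.length) (hj : j < (g[k]'hk).length) :
    pvCell g (k : Int) (j : Int) = (g[k]'hk)[j]'hj := by
  have h1 := pvCell_in (g := g) (y := (k : Int)) (x := (j : Int))
    (Int.natCast_nonneg k) (Int.natCast_nonneg j) (by simpa using hk) (by simpa using hj)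
  simpa using h1

lemma pvRowLen_g {g0 g : List (List Char)} (hsh : pvShape g0 g) (hre : pvRect g0)
    (k : Nat) (hk : k < g.length) : (g[k]'hk).length = pvRowLen g0 0 := by
  have hk0 : k < g0.length := by have := pvLen_eq hsh; omega
  have h1 : (g.map List.length)[k]'(by simpa using hk) = (g0.map List.length)[k]'(by simpa using hk0) :=
    List.getElem_of_eq hsh _
  simp only [List.getElem_map] at h1
  rw [h1]
  exact hre _ (List.getElem_mem hk0)

lemma pvSeat_mem (g0 g : List (List Char)) (hsh : pvShape g0 g) (hse : pvSeatEq g0 g)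
    (hre : pvRect g0) (k j : Nat) (hk : k < g.length) (hj : j < (g[k]'hk).length)
    (hs : pvSeat ((g[k]'hk)[j]'hj) = true) : ((k : Int), (j : Int)) ∈ pvSeatsB g0 := by
  have hk0 : k < g0.length := by have := pvLen_eq hsh; omega
  have hj0 : j < (g0[k]'hk0).length := by
    have h1 := pvRowLen_g hsh hre k hk
    have h2 : (g0[k]'hk0).length = pvRowLen g0 0 := hre _ (List.getElem_mem hk0)
    omega
  have hs0 : pvSeat ((g0[k]'hk0)[j]'hj0) = true := by
    rw [← pvCell_nat g0 k j hk0 hj0, ← hse (k : Int) (j : Int) (Int.natCast_nonneg k) (Int.natCast_nonneg j),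
      pvCell_nat g k j hk hj]
    exact hs
  rw [pvMem_seats]
  exact ⟨k, hk0, j, hj0, hs0, rfl, rfl⟩

-- a cell's change-flag is false iff (when it is a seat) B's new value agrees with its old one
lemma pvFlag_iff (g0 g : List (List Char)) (hsh : pvShape g0 g) (hse : pvSeatEq g0 g)
    (hre : pvRect g0) (k j : Nat) (hk : k < g.length) (hj : j < (g[k]'hk).length) :
    ((pvCellStepA g (pvRowLen g0 0) (k : Int) (j : Int) ((g[k]'hk)[j]'hj)).2 = false)
      ↔ (pvSeat ((g[k]'hk)[j]'hj) = true →
          pvNewVal (pvOccOf g0 g) (((k : Int), (j : Int)), pvNbrsOf g0 (pvSS g0) ((k : Int), (j : Int)))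
            = (((g[k]'hk)[j]'hj) == '#')) := by
  have hlen := pvLen_eq hsh
  set c := (g[k]'hk)[j]'hj with hc
  by_cases hs : pvSeat c = true
  · have hbnd2 : ((k : Int)) < (g0.length : Int) := by exact_mod_cast by omega
    have hbnd4 : ((j : Int)) < (pvRowLen g0 0 : Int) := by
      have := pvRowLen_g hsh hre k hk
      exact_mod_cast by omega
    have hstep := pvSeatStep g0 g hsh hse hre (k : Int) (j : Int)
      (Int.natCast_nonneg k) hbnd2 (Int.natCast_nonneg j) hbnd4 c
      (by rw [pvCell_nat g k j hk hj]) hs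
    rw [hstep.2]
    simp [hs]
  · rw [Bool.not_eq_true] at hs
    rw [pvStepA_nonseat g (pvRowLen g0 0) (k : Int) (j : Int) c hs]
    simp [hs]

-- A's change flag is false exactly when B's step is the identity on the occupancy list
lemma pvChanged_iff (g0 g : List (List Char)) (hsh : pvShape g0 g) (hse : pvSeatEq g0 g)
    (hre : pvRect g0) :
    ((pvStepA g).2.1 = false) ↔ pvStepB (pvSN g0) (pvOccOf g0 g) = pvOccOf g0 g := by
  have hlen := pvLen_eq hsh
  have hL : ((pvStepA g).2.1 = false)
      ↔ ∀ (k : Nat) (hk : k < g.length) (j : Nat) (hj : j < (g[k]'hk).length),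
          (pvCellStepA g (g[k]'hk).length ((0 : Int) + (k : Int)) ((0 : Int) + (j : Int)) ((g[k]'hk)[j]'hj)).2 = false := by
    rw [pvStepA_desc]
    show ((PySem.List.enumerate g 0).any fun yr => (pvRowA g yr.1 yr.2).2) = false ↔ _
    rw [List.any_eq_false]
    constructor
    · intro h k hk j hj
      have h1 : (pvRowA g ((0 : Int) + (k : Int)) (g[k]'hk)).2 = false :=
        Bool.eq_false_iff.mpr
          (h ((0 : Int) + (k : Int), g[k]'hk) ((PySem.List.mem_enumerate_iff _ _ _).mpr ⟨k, hk, rfl⟩))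
      rw [pvRowA_desc] at h1
      replace h1 : ((PySem.List.enumerate (g[k]'hk) 0).any
          fun p => (pvCellStepA g (g[k]'hk).length ((0 : Int) + (k : Int)) p.1 p.2).2) = false := h1
      rw [List.any_eq_false] at h1
      exact Bool.eq_false_iff.mpr
        (h1 ((0 : Int) + (j : Int), (g[k]'hk)[j]'hj) ((PySem.List.mem_enumerate_iff _ _ _).mpr ⟨j, hj, rfl⟩))
    · intro h yr hyr
      obtain ⟨k, hk, rfl⟩ := (PySem.List.mem_enumerate_iff _ _ _).mp hyr
      show ¬ (pvRowA g ((0 : Int) + (k : Int)) (g[k]'hk)).2 = true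
      rw [Bool.not_eq_true, pvRowA_desc]
      show ((PySem.List.enumerate (g[k]'hk) 0).any
          fun p => (pvCellStepA g (g[k]'hk).length ((0 : Int) + (k : Int)) p.1 p.2).2) = false
      rw [List.any_eq_false]
      intro xc hxc
      obtain ⟨j, hj, rfl⟩ := (PySem.List.mem_enumerate_iff _ _ _).mp hxc
      exact Bool.eq_false_iff.mp (h k hk j hj)
  have hR : (pvStepB (pvSN g0) (pvOccOf g0 g) = pvOccOf g0 g)
      ↔ ∀ p ∈ pvSeatsB g0,
          pvNewVal (pvOccOf g0 g) (p, pvNbrsOf g0 (pvSS g0) p) = (pvCell g p.1 p.2 == '#') := by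
    rw [pvStepB_desc, pvSN_desc, List.map_map]
    unfold pvOccOf
    rw [List.map_inj_left]
    constructor
    · intro h p hp
      have := h p hp
      simpa using this
    · intro h p hp
      simp only [Function.comp]
      rw [h p hp]
  rw [hL, hR]
  constructor
  · rintro h ⟨y, x⟩ hp
    obtain ⟨k, hk0, j, hj0, hs0, rfl, rfl⟩ := pvMem_seats.mp hp
    have hk : k < g.length := by omega
    have hj : j < (g[k]'hk).length := by
      have h1 := pvRowLen_g hsh hre k hk
      have h2 : (g0[k]'hk0).length = pvRowLen g0 0 := hre _ (List.getElem_mem hk0)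
      omega
    have hflag := h k hk j hj
    simp only [zero_add] at hflag
    rw [pvRowLen_g hsh hre k hk] at hflag
    have hsg : pvSeat ((g[k]'hk)[j]'hj) = true := by
      rw [← pvCell_nat g k j hk hj, hse (k : Int) (j : Int) (Int.natCast_nonneg k) (Int.natCast_nonneg j),
        pvCell_nat g0 k j hk0 hj0]
      exact hs0
    have hres := (pvFlag_iff g0 g hsh hse hre k j hk hj).mp hflag hsg
    have hcell : pvCell g ((k : Int), (j : Int)).1 ((k : Int), (j : Int)).2 = (g[k]'hk)[j]'hj :=
      pvCell_nat g k j hk hj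
    rw [hcell]
    exact hres
  · intro h k hk j hj
    simp only [zero_add]
    rw [pvRowLen_g hsh hre k hk]
    rw [pvFlag_iff g0 g hsh hse hre k j hk hj]
    intro hsg
    have hp := pvSeat_mem g0 g hsh hse hre k j hk hj hsg
    have hres := h ((k : Int), (j : Int)) hp
    have hcell : pvCell g ((k : Int), (j : Int)).1 ((k : Int), (j : Int)).2 = (g[k]'hk)[j]'hj :=
      pvCell_nat g k j hk hj
    rw [hcell] at hres
    exact hres

-- B's step tracks A's stepped grid
lemma pvStepB_val (g0 g : List (List Char)) (hsh : pvShape g0 g) (hse : pvSeatEq g0 g)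
    (hre : pvRect g0) :
    pvStepB (pvSN g0) (pvOccOf g0 g) = pvOccOf g0 (pvStepA g).1 := by
  rw [pvStepB_desc, pvSN_desc, List.map_map]
  show ((pvSeatsB g0).map ((fun pn => (pn.1, pvNewVal (pvOccOf g0 g) pn)) ∘ (fun p => (p, pvNbrsOf g0 (pvSS g0) p))))
      = (pvSeatsB g0).map (fun p => (p, pvCell (pvStepA g).1 p.1 p.2 == '#'))
  apply List.map_congr_left
  rintro ⟨y, x⟩ hp
  obtain ⟨k, hk0, j, hj0, hs0, rfl, rfl⟩ := pvMem_seats.mp hp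
  have hlen := pvLen_eq hsh
  have hk : k < g.length := by omega
  have hj : j < (g[k]'hk).length := by
    have h1 := pvRowLen_g hsh hre k hk
    have h2 : (g0[k]'hk0).length = pvRowLen g0 0 := hre _ (List.getElem_mem hk0)
    omega
  have hsg : pvSeat ((g[k]'hk)[j]'hj) = true := by
    rw [← pvCell_nat g k j hk hj, hse (k : Int) (j : Int) (Int.natCast_nonneg k) (Int.natCast_nonneg j),
      pvCell_nat g0 k j hk0 hj0]
    exact hs0
  have hcellnew : pvCell (pvStepA g).1 ((k : Int), (j : Int)).1 ((k : Int), (j : Int)).2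
      = (pvCellStepA g (g[k]'hk).length (k : Int) (j : Int) (pvCell g (k : Int) (j : Int))).1 := by
    have := pvStepA_cell g (y := (k : Int)) (x := (j : Int))
      (Int.natCast_nonneg k) (Int.natCast_nonneg j) (by simpa using hk) (by simpa using hj)
    simpa using this
  have hbnd2 : ((k : Int)) < (g0.length : Int) := by exact_mod_cast by omega
  have hbnd4 : ((j : Int)) < (pvRowLen g0 0 : Int) := by
    have := pvRowLen_g hsh hre k hk
    exact_mod_cast by omega
  have hstep := pvSeatStep g0 g hsh hse hre (k : Int) (j : Int)
    (Int.natCast_nonneg k) hbnd2 (Int.natCast_nonneg j) hbnd4 (pvCell g (k : Int) (j : Int)) rfl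
    (by rw [pvCell_nat g k j hk hj]; exact hsg)
  simp only [Function.comp_apply, Prod.mk.injEq]
  refine ⟨trivial, ?_⟩
  rw [hcellnew, pvRowLen_g hsh hre k hk, hstep.1]
  cases hnv : pvNewVal (pvOccOf g0 g) (((k : Int), (j : Int)), pvNbrsOf g0 (pvSS g0) ((k : Int), (j : Int))) <;>
    simp [hnv]

-- final-count lemma: per row, then over the grid
lemma pvRowCount (g : List (List Char)) (y : Int) :
    ∀ (r0 r : List Char) (s : Nat),
      r0.length = r.length →
      (∀ (j : Nat) (hj : j < r.length), pvCell g y ((s : Int) + (j : Int)) = r[j]'hj) →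
      (∀ (j : Nat) (hj0 : j < r0.length) (hj : j < r.length), pvSeat (r0[j]'hj0) = pvSeat (r[j]'hj)) →
      (PySem.List.enumerate r0 (s : Int)).countP
          (fun xc => (pvCell g y xc.1 == '#') && pvSeat xc.2)
        = r.count '#' := by
  intro r0
  induction r0 with
  | nil =>
    intro r s hl _ _
    cases r with
    | nil => simp
    | cons c t => simp at hl
  | cons c0 t0 ih =>
    intro r s hl hcell hseat
    cases r with
    | nil => simp at hl
    | cons c t =>
      rw [PySem.List.enumerate_cons]
      have hc0 : pvCell g y (s : Int) = c := by
        have := hcell 0 (by simp)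
        simpa using this
      have hs0 : pvSeat c0 = pvSeat c := by
        have := hseat 0 (by simp) (by simp)
        simpa using this
      have hhead : ((pvCell g y (s : Int) == '#') && pvSeat c0) = (c == '#') := by
        rw [hc0, hs0]
        cases hcb : (c == '#') with
        | true => have := eq_of_beq hcb; subst this; simp [pvSeat]
        | false => simp [hcb]
      have htail : (PySem.List.enumerate t0 ((s : Int) + 1)).countP
            (fun xc => (pvCell g y xc.1 == '#') && pvSeat xc.2) = t.count '#' := by
        have hcast : ((s : Int) + 1) = (((s + 1 : Nat)) : Int) := by push_cast; ring
        rw [hcast]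
        apply ih t (s + 1) (by simpa using hl)
        · intro j hj
          have := hcell (j + 1) (by simpa using Nat.succ_lt_succ hj)
          have harg : ((s : Int) + ((j + 1 : Nat) : Int)) = (((s + 1 : Nat)) : Int) + (j : Int) := by
            push_cast; ring
          rw [harg] at this
          simpa using this
        · intro j hj0 hj
          have := hseat (j + 1) (by simpa using Nat.succ_lt_succ hj0) (by simpa using Nat.succ_lt_succ hj)
          simpa using this
      simp only [List.countP_cons, List.count_cons, htail, hhead]

lemma pvCount_nat (g0 g : List (List Char)) (hsh : pvShape g0 g) (hse : pvSeatEq g0 g)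
    (hre : pvRect g0) :
    (pvSeatsB g0).countP (fun p => pvCell g p.1 p.2 == '#')
      = (g.map (fun r => r.count '#')).sum := by
  have hlen := pvLen_eq hsh
  rw [pvSeatsB_desc, List.countP_flatMap]
  simp only [Function.comp_def]
  have hmapeq : (PySem.List.enumerate g0 0).map
        (fun yr => (((PySem.List.enumerate yr.2 0).filter (fun xc => pvSeat xc.2)).map
          (fun xc => ((yr.1, xc.1) : Int × Int))).countP (fun p => pvCell g p.1 p.2 == '#'))
      = g.map (fun r => r.count '#') := by
    apply List.ext_getElem
    · simp [PySem.List.length_enumerate, hlen]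
    · intro k h1 h2
      have hk0 : k < g0.length := by simpa [PySem.List.length_enumerate] using h1
      have hk : k < g.length := by omega
      simp only [List.getElem_map, PySem.List.getElem_enumerate]
      rw [List.countP_map, List.countP_filter]
      have hj0len : (g0[k]'hk0).length = (g[k]'hk).length := by
        have h1 := pvRowLen_g hsh hre k hk
        have h2 : (g0[k]'hk0).length = pvRowLen g0 0 := hre _ (List.getElem_mem hk0)
        omega
      have := pvRowCount g ((0 : Int) + (k : Int)) (g0[k]'hk0) (g[k]'hk) 0 hj0len
        (fun j hj => by
          have := pvCell_nat g k j hk hj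
          simpa using this)
        (fun j hj0 hj => by
          have h := hse (k : Int) (j : Int) (Int.natCast_nonneg k) (Int.natCast_nonneg j)
          rw [pvCell_nat g k j hk hj, pvCell_nat g0 k j hk0 hj0] at h
          exact h.symm)
      simpa using this
  rw [hmapeq]

lemma pvCount_eq (g0 g : List (List Char)) (hsh : pvShape g0 g) (hse : pvSeatEq g0 g)
    (hre : pvRect g0) :
    g.foldl (fun acc row => acc + ((row.count '#' : Nat) : Int)) 0 = pvSumVals (pvOccOf g0 g) := by
  rw [PySem.List.foldl_add]
  unfold pvSumVals pvOccOf
  rw [List.map_map]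
  have hfun : ((fun e : (Int × Int) × Bool => if e.2 then (1 : Int) else 0)
        ∘ (fun p : Int × Int => (p, pvCell g p.1 p.2 == '#')))
      = fun p : Int × Int => if (pvCell g p.1 p.2 == '#') then (1 : Int) else 0 := rfl
  rw [hfun, PySem.List.sum_map_ite_one_zero, pvCount_nat g0 g hsh hse hre]
  rw [Nat.cast_list_sum, List.map_map]
  simp [Function.comp_def]

-- the two bounded loops agree step for step
lemma pvLoop_eq (g0 : List (List Char)) (hre : pvRect g0) :
    ∀ (fuel : Nat) (g : List (List Char)), pvShape g0 g → pvSeatEq g0 g →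
      (pvLoopA fuel g).foldl (fun acc row => acc + ((row.count '#' : Nat) : Int)) 0
        = pvLoopB (pvSN g0) fuel (pvOccOf g0 g) := by
  intro fuel
  induction fuel with
  | zero =>
    intro g hsh hse
    exact pvCount_eq g0 g hsh hse hre
  | succ f ih =>
    intro g hsh hse
    have hsh' : pvShape g0 (pvStepA g).1 := by
      unfold pvShape
      rw [pvStepA_shape]
      exact hsh
    have hse' : pvSeatEq g0 (pvStepA g).1 := by
      intro y x hy hx
      rw [pvStepA_seatEq g y x hy hx]
      exact hse y x hy hx
    have hval := pvStepB_val g0 g hsh hse hre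
    simp only [pvLoopA, pvLoopB]
    by_cases hc : (pvStepA g).2.1 = true
    · have hne : pvStepB (pvSN g0) (pvOccOf g0 g) ≠ pvOccOf g0 g := by
        intro heq
        rw [← pvChanged_iff g0 g hsh hse hre] at heq
        rw [heq] at hc
        exact Bool.false_ne_true hc
      have hbe : (pvStepB (pvSN g0) (pvOccOf g0 g) == pvOccOf g0 g) = false :=
        beq_eq_false_iff_ne.mpr hne
      rw [hc]
      simp only [if_true, hbe, Bool.false_eq_true, if_false]
      rw [hval]
      exact ih (pvStepA g).1 hsh' hse'
    · rw [Bool.not_eq_true] at hc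
      have heq : pvStepB (pvSN g0) (pvOccOf g0 g) = pvOccOf g0 g :=
        (pvChanged_iff g0 g hsh hse hre).mp hc
      have hbe : (pvStepB (pvSN g0) (pvOccOf g0 g) == pvOccOf g0 g) = true := by
        rw [heq]; exact beq_self_eq_true _
      rw [hc]
      simp only [Bool.false_eq_true, if_false, hbe, if_true]
      rw [hval]
      exact (pvCount_eq g0 (pvStepA g).1 hsh' hse' hre).symm ▸ rfl

-- ===== VERDICT (by name: the statement is the Claim_ definition above) =====
theorem compute_spec : Claim_equal_compute := by
  unfold Claim_equal_compute
  intro data _ hpre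
  unfold Spec_compute
  have hre : pvRect (pvGrid data) := by
    intro r hr
    obtain ⟨str, hsmem, rfl⟩ := List.mem_map.mp hr
    cases hlines : PySem.Str.splitlines data with
    | nil =>
      rw [hlines] at hsmem
      simp at hsmem
    | cons l0 rest =>
      have h0 : pvRowLen (pvGrid data) 0 = l0.toList.length := by
        unfold pvGrid pvRowLen
        rw [hlines]
        simp [PySem.List.pyGet?_zero_cons]
      rw [h0]
      have hl := hpre str hsmem l0 (by rw [hlines]; exact List.mem_cons_self)
      rw [PySem.Str.len_eq, PySem.Str.len_eq] at hl
      exact_mod_cast hl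
  have hloop := pvLoop_eq (pvGrid data) hre (data.toList.length + 2) (pvGrid data) rfl
    (fun y x hy hx => rfl)
  simp only [compute, compute_alt]
  rw [hloop]
  have hsn : (pvSeatsB (pvGrid data)).zip
        ((pvSeatsB (pvGrid data)).foldl (fun acc p => acc ++ [pvNbrsOf (pvGrid data) (PySem.Set.ofList (pvSeatsB (pvGrid data))) p]) [])
      = pvSN (pvGrid data) := by
    rw [PySem.List.foldl_append_singleton_eq_map]
    simp [pvSN, pvSS]
  rw [← hsn]
  rfl
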